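-- pv_equiv track=rewrite | github.com/reeson46/Poe-web-api-reactified | app/api/utils.py | amendSentence
-- ===== SOURCE A (Python) =====
-- def amendSentence(string):
--     string = list(string)
--     newstring = ""
--     # Traverse the string
--     for i in range(len(string)):
--
--         # Convert to lowercase if its
--         # an uppercase character
--         if string[i] >= "A" and string[i] <= "Z":
--             string[i] = chr(ord(string[i]) + 32)
--
--             # Print - before it
--             # if its an uppercase character
--             if i != 0:
--                 newstring += "-"
--
--             # Print the character
--             newstring += string[i]
--
--         # if lowercase character
--         # then just print
--         else:
--             newstring += string[i]
--
--     return newstring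
-- ===== SOURCE B (Python) =====
-- def amendSentence(string):
--     # Stage 1: split into chunks, starting a new chunk at every uppercase
--     # letter except at the very start of the string.
--     parts = []
--     cur = ""
--     for c in string:
--         if 'A' <= c <= 'Z' and (parts or cur):
--             parts.append(cur)
--             cur = ""
--         cur += c
--     parts.append(cur)
--     # Stage 2: lowercase each chunk and join with hyphens.
--     return '-'.join(p.lower() for p in parts)
-- ===== Notes on version B (the rewrite author's own statement) =====
-- stated objective: alternative
-- what changed: Instead of emitting characters one by one with an index check, B first splits the string into chunks that begin at every uppercase letter except a leading one, then lowercases each chunk and joins the chunks with hyphens.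
import Mathlib
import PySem

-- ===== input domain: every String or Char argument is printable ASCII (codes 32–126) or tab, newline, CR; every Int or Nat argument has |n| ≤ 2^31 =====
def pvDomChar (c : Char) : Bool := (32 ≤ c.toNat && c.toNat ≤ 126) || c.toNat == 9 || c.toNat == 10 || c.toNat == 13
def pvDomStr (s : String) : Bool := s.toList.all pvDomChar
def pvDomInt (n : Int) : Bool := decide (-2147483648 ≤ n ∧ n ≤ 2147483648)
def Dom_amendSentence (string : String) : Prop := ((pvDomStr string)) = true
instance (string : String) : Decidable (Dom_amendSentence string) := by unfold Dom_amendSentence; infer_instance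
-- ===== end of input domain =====

-- B replaces A's single emit-as-you-go index loop by a two-stage algorithm:
-- split the string into chunks beginning at each non-leading uppercase letter,
-- then lowercase every chunk and join them with hyphens (objective: alternative).

-- ===== PORT A =====
-- the loop 'for i in range(len(string))' reading string[i], rendered as the obvious
-- structural recursion over the characters with the index i carried along
def amendSentenceGo (i : Nat) (s : List Char) (newstring : String) : String :=
  match s with
  | [] => newstring
  | c :: rest =>
    if 'A' ≤ c ∧ c ≤ 'Z' then
      -- string[i] = chr(ord(string[i]) + 32); optional "-"; then the character
      let c' := Char.ofNat (c.toNat + 32)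
      amendSentenceGo (i + 1) rest ((if i ≠ 0 then newstring ++ "-" else newstring) ++ c'.toString)
    else
      amendSentenceGo (i + 1) rest (newstring ++ c.toString)

def amendSentence (string : String) : String :=
  amendSentenceGo 0 string.toList ""

-- ===== PORT B =====
-- "'-'.join(p.lower() for p in parts)" over char-list chunks
def amendSentenceJoin (parts : List (List Char)) : List Char :=
  match parts with
  | [] => []
  | [p] => p.map PySem.Chars.lowerChar
  | p :: ps => p.map PySem.Chars.lowerChar ++ '-' :: amendSentenceJoin ps

-- the splitting loop 'for c in string', carrying (parts, cur)
def amendSentenceSplit (s : List Char) (parts : List (List Char)) (cur : List Char) : List (List Char) :=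
  match s with
  | [] => parts ++ [cur]
  | c :: rest =>
    if ('A' ≤ c ∧ c ≤ 'Z') ∧ (parts ≠ [] ∨ cur ≠ []) then
      amendSentenceSplit rest (parts ++ [cur]) [c]
    else
      amendSentenceSplit rest parts (cur ++ [c])

def amendSentence_alt (string : String) : String :=
  String.ofList (amendSentenceJoin (amendSentenceSplit string.toList [] []))

-- ===== PRECONDITION & SPEC =====
def Spec_amendSentence (string : String) (out : String) : Prop := out = amendSentence_alt string
instance (string : String) (out : String) : Decidable (Spec_amendSentence string out) := by unfold Spec_amendSentence; infer_instance

-- ===== CLAIM (what is proved, stated in full; the proofs are below) =====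
def Claim_equal_amendSentence : Prop := ∀ (string : String), Dom_amendSentence string → Spec_amendSentence string (amendSentence string)

-- ===== LEMMAS AND PROOFS =====

def pvSub (c : Char) : List Char :=
  if 'A' ≤ c ∧ c ≤ 'Z' then ['-', Char.ofNat (c.toNat + 32)] else [c]

theorem pvGo_eq (s : List Char) : ∀ (i : Nat) (acc : String), i ≠ 0 →
    (amendSentenceGo i s acc).toList = acc.toList ++ s.flatMap pvSub := by
  induction s with
  | nil => intro i acc _; simp [amendSentenceGo]
  | cons c rest ih =>
    intro i acc hi
    by_cases hc : 'A' ≤ c ∧ c ≤ 'Z'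
    · simp [amendSentenceGo, hc, hi, ih (i+1) _ (by omega), pvSub]
    · simp [amendSentenceGo, hc, ih (i+1) _ (by omega), pvSub]

theorem lowerChar_upper (c : Char) (h : 'A' ≤ c ∧ c ≤ 'Z') :
    PySem.Chars.lowerChar c = Char.ofNat (c.toNat + 32) := by
  simp [PySem.Chars.lowerChar, PySem.Chars.isupper, h.1, h.2]

theorem lowerChar_other (c : Char) (h : ¬ ('A' ≤ c ∧ c ≤ 'Z')) :
    PySem.Chars.lowerChar c = c := by
  have hb : ('A' ≤ c && c ≤ 'Z') = false := by
    rcases Decidable.not_and_iff_or_not.mp h with h1 | h1 <;> simp [h1]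
  simp [PySem.Chars.lowerChar, PySem.Chars.isupper, hb]

theorem join_cons (p : List Char) (ps : List (List Char)) (h : ps ≠ []) :
    amendSentenceJoin (p :: ps) =
      p.map PySem.Chars.lowerChar ++ '-' :: amendSentenceJoin ps := by
  cases ps with
  | nil => exact absurd rfl h
  | cons q qs => rfl

theorem join_append_new (parts : List (List Char)) (cur x : List Char) :
    amendSentenceJoin ((parts ++ [cur]) ++ [x]) =
      amendSentenceJoin (parts ++ [cur]) ++ '-' :: x.map PySem.Chars.lowerChar := by
  induction parts with
  | nil => simp [amendSentenceJoin]
  | cons p ps ih =>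
    rw [List.cons_append, List.cons_append, join_cons p _ (by simp),
        join_cons p _ (by simp), ih]
    simp

theorem join_append_last (parts : List (List Char)) (cur : List Char) (c : Char) :
    amendSentenceJoin (parts ++ [cur ++ [c]]) =
      amendSentenceJoin (parts ++ [cur]) ++ [PySem.Chars.lowerChar c] := by
  induction parts with
  | nil => simp [amendSentenceJoin]
  | cons p ps ih =>
    rw [List.cons_append, List.cons_append, join_cons p _ (by simp),
        join_cons p _ (by simp), ih]
    simp

theorem split_eq (rest : List Char) : ∀ (parts : List (List Char)) (cur : List Char),
    cur ≠ [] →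
    amendSentenceJoin (amendSentenceSplit rest parts cur) =
      amendSentenceJoin (parts ++ [cur]) ++ rest.flatMap pvSub := by
  induction rest with
  | nil => intro parts cur _; simp [amendSentenceSplit]
  | cons c rest ih =>
    intro parts cur hcur
    by_cases hc : 'A' ≤ c ∧ c ≤ 'Z'
    · have hg : (('A' ≤ c ∧ c ≤ 'Z') ∧ (parts ≠ [] ∨ cur ≠ [])) := ⟨hc, Or.inr hcur⟩
      rw [amendSentenceSplit, if_pos hg, ih _ _ (by simp), join_append_new]
      simp [pvSub, hc, lowerChar_upper c hc]
    · have hg : ¬ (('A' ≤ c ∧ c ≤ 'Z') ∧ (parts ≠ [] ∨ cur ≠ [])) := fun h => hc h.1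
      rw [amendSentenceSplit, if_neg hg, ih _ _ (by simp), join_append_last]
      simp [pvSub, hc, lowerChar_other c hc]

-- ===== VERDICT =====
theorem amendSentence_spec : Claim_equal_amendSentence := by
  intro string _
  unfold Spec_amendSentence amendSentence amendSentence_alt
  apply String.toList_injective
  have hofl : ∀ l : List Char, (String.ofList l).toList = l := by intro l; simp
  rw [hofl]
  cases hs : string.toList with
  | nil => simp [amendSentenceGo, amendSentenceSplit, amendSentenceJoin]
  | cons c rest =>
    have hsplit : amendSentenceSplit (c :: rest) [] [] = amendSentenceSplit rest [] [c] := by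
      rw [amendSentenceSplit]; simp
    rw [hsplit, split_eq rest [] [c] (by simp)]
    by_cases hc : 'A' ≤ c ∧ c ≤ 'Z'
    · simp [amendSentenceGo, hc, pvGo_eq rest 1 _ (by omega), amendSentenceJoin,
        lowerChar_upper c hc]
    · simp [amendSentenceGo, hc, pvGo_eq rest 1 _ (by omega), amendSentenceJoin,
        lowerChar_other c hc]
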